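-- pv_equiv track=rewrite | github.com/abussone/macro_dashboards | pages/2_US_Dashboard.py | _gold_pick_member
-- ===== SOURCE A (Python) =====
-- def _gold_pick_member(names, must_contain):
--     names_l = [(n, n.lower()) for n in names]
--     matches = [n for n, nl in names_l if all(s.lower() in nl for s in must_contain)]
--     if not matches:
--         raise ValueError(f"No zip member found containing: {must_contain}")
--
--     def score(n):
--         nl = n.lower()
--         s = 0
--         if "historical" in nl:
--             s += 30
--         if "hist" in nl:
--             s += 20
--         if "current" in nl:
--             s += 10
--         return s
--
--     return sorted(matches, key=score, reverse=True)[0]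
-- ===== SOURCE B (Python) =====
-- def _gold_pick_member(names, must_contain):
--     subs = [s.lower() for s in must_contain]
--     best = None  # (name, score) of the first best-scoring match seen so far
--     for n in names:
--         nl = n.lower()
--         if not all(s in nl for s in subs):
--             continue
--         sc = 0
--         if "historical" in nl:
--             sc += 30
--         if "hist" in nl:
--             sc += 20
--         if "current" in nl:
--             sc += 10
--         if best is None or sc > best[1]:
--             best = (n, sc)
--     if best is None:
--         raise ValueError(f"No zip member found containing: {must_contain}")
--     return best[0]
-- ===== Notes on version B (the rewrite author's own statement) =====
-- stated objective: simpler
-- what changed: Replaced the build-matches-list-then-stable-sort-and-take-head pipeline with a single fused pass that lowercases each must_contain once up front and tracks a running (name, score) best with a strict > update (preserving the stable first-maximum tie-break), raising the same ValueError if no name matched.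
import Mathlib
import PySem

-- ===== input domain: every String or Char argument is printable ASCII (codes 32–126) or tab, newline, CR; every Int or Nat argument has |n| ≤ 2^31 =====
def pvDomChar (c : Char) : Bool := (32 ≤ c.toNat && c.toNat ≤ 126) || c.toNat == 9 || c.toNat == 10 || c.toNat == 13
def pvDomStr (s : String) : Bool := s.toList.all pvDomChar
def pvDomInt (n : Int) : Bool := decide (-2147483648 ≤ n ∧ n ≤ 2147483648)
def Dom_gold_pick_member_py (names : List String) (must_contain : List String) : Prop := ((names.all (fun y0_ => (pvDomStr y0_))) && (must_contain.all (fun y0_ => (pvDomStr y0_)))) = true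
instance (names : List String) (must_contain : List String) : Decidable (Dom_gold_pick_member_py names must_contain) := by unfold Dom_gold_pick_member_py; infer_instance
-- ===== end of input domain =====

-- B fuses A's filter-then-sort-then-head into one pass keeping a running first-seen best (simpler; return value proved equal; A's no-match ValueError, which B raises too, is excluded by Pre_).

-- ===== PORT A =====
def pvScoreA (n : String) : Int :=
  let nl := PySem.Str.lower n
  let s : Int := 0
  let s := if PySem.Str.isIn "historical" nl then s + 30 else s
  let s := if PySem.Str.isIn "hist" nl then s + 20 else s
  let s := if PySem.Str.isIn "current" nl then s + 10 else s
  s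

def gold_pick_member_py (names : List String) (must_contain : List String) : String :=
  let names_l := names.map (fun n => (n, PySem.Str.lower n))
  let ms := (names_l.filter (fun q => must_contain.all (fun s => PySem.Str.isIn (PySem.Str.lower s) q.2))).map (fun q => q.1)
  match PySem.List.sorted ms pvScoreA true with
  | [] => ""          -- Python raises ValueError here (matches empty); excluded by Pre_
  | m :: _ => m

-- ===== PORT B =====
def gold_pick_member_py_alt (names : List String) (must_contain : List String) : String :=
  let subs := must_contain.map PySem.Str.lower
  let best := names.foldl (fun best n =>
    let nl := PySem.Str.lower n
    if subs.all (fun s => PySem.Str.isIn s nl) then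
      let sc : Int := 0
      let sc := if PySem.Str.isIn "historical" nl then sc + 30 else sc
      let sc := if PySem.Str.isIn "hist" nl then sc + 20 else sc
      let sc := if PySem.Str.isIn "current" nl then sc + 10 else sc
      match best with
      | none => some (n, sc)
      | some (b, bs) => if bs < sc then some (n, sc) else some (b, bs)
    else best) none
  match best with
  | some (b, _) => b
  | none => ""        -- Python raises ValueError here; excluded by Pre_

-- ===== PRECONDITION & SPEC =====
-- Pre_ excludes exactly the inputs with no matching name, on which A (and B) raise ValueError.
def Pre_gold_pick_member_py (names : List String) (must_contain : List String) : Prop :=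
  ∃ n ∈ names, ∀ s ∈ must_contain, PySem.Str.isIn (PySem.Str.lower s) (PySem.Str.lower n) = true
instance (names : List String) (must_contain : List String) : Decidable (Pre_gold_pick_member_py names must_contain) := by unfold Pre_gold_pick_member_py; infer_instance
def pvWitness_gold_pick_member_py : List String × List String := (["Hist_data.csv"], ["hist"])

def Spec_gold_pick_member_py (names : List String) (must_contain : List String) (out : String) : Prop := out = gold_pick_member_py_alt names must_contain
instance (names : List String) (must_contain : List String) (out : String) : Decidable (Spec_gold_pick_member_py names must_contain out) := by unfold Spec_gold_pick_member_py; infer_instance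

-- ===== CLAIM (what is proved, stated in full; the proofs are below) =====
def Claim_equal_gold_pick_member_py : Prop := ∀ (names : List String) (must_contain : List String), Dom_gold_pick_member_py names must_contain → Pre_gold_pick_member_py names must_contain → Spec_gold_pick_member_py names must_contain (gold_pick_member_py names must_contain)

-- ===== LEMMAS AND PROOFS =====

def pvStep (key : String → Int) (best : Option (String × Int)) (n : String) : Option (String × Int) :=
  match best with
  | none => some (n, key n)
  | some (b, bs) => if bs < key n then some (n, key n) else some (b, bs)

theorem pvInsertHead (key : String → Int) (x : String) (L : List String) :
    (PySem.List.insertBy (fun a b => decide (key b < key a)) x L).head?.map (fun b => (b, key b))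
      = pvStep key (L.head?.map (fun b => (b, key b))) x := by
  cases L with
  | nil => simp [PySem.List.insertBy, pvStep]
  | cons y ys =>
      by_cases h : key y < key x
      · simp [PySem.List.insertBy, pvStep, h]
      · simp [PySem.List.insertBy, pvStep, h]

theorem pvFoldHead (key : String → Int) (ms : List String) : ∀ (L : List String),
    ((ms.foldl (fun acc x => PySem.List.insertBy (fun a b => decide (key b < key a)) x acc) L).head?).map (fun b => (b, key b))
      = ms.foldl (pvStep key) (L.head?.map (fun b => (b, key b))) := by
  induction ms with
  | nil => intro L; simp
  | cons m rest ih =>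
      intro L
      rw [List.foldl_cons, List.foldl_cons, ih, pvInsertHead]

theorem pvAltFold (names must_contain : List String) :
    gold_pick_member_py_alt names must_contain =
      (match (names.filter (fun n => must_contain.all (fun s => PySem.Str.isIn (PySem.Str.lower s) (PySem.Str.lower n)))).foldl (pvStep pvScoreA) none with
       | some (b, _) => b
       | none => "") := by
  unfold gold_pick_member_py_alt
  simp only [List.all_map]
  rw [List.foldl_filter]
  rfl

theorem pvAForm (names must_contain : List String) :
    gold_pick_member_py names must_contain =
      (match PySem.List.sorted (names.filter (fun n => must_contain.all (fun s => PySem.Str.isIn (PySem.Str.lower s) (PySem.Str.lower n)))) pvScoreA true with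
       | [] => ""
       | m :: _ => m) := by
  unfold gold_pick_member_py
  simp only [List.filter_map, List.map_map, Function.comp_def, List.map_id']

theorem pvMain (names must_contain : List String)
    (hpre : Pre_gold_pick_member_py names must_contain) :
    gold_pick_member_py names must_contain = gold_pick_member_py_alt names must_contain := by
  rw [pvAForm, pvAltFold]
  set q : String → Bool := fun n => must_contain.all (fun s => PySem.Str.isIn (PySem.Str.lower s) (PySem.Str.lower n)) with hq
  have hne : names.filter q ≠ [] := by
    rw [Ne, List.filter_eq_nil_iff]
    push Not
    obtain ⟨n, hn, hall⟩ := hpre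
    refine ⟨n, hn, ?_⟩
    simp only [hq, List.all_eq_true]
    intro s hs
    exact hall s hs
  have hkey := pvFoldHead pvScoreA (names.filter q) []
  rw [← PySem.List.sorted_rev_eq_foldl_insertBy] at hkey
  cases hs : PySem.List.sorted (names.filter q) pvScoreA true with
  | nil => exact absurd ((PySem.List.sorted_eq_nil_iff _ _ _).mp hs) hne
  | cons m t =>
      rw [hs] at hkey
      simp only [List.head?, Option.map] at hkey
      rw [← hkey]

-- ===== VERDICT (by name: the statement is the Claim_ definition above) =====
theorem gold_pick_member_py_spec : Claim_equal_gold_pick_member_py := by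
  intro names must_contain _ hpre
  exact pvMain names must_contain hpre
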